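-- pv_equiv track=rewrite | github.com/scrapinghub/portia | slybot/slybot/utils.py | load_plugin_names
-- ===== SOURCE A (Python) =====
-- def load_plugin_names(settings):
--     """
--     Generate a unique name for a plugin based on the class name module name
--     and path
--
--     >>> settings = {'PLUGINS': ['a', 'b.c', 'a.c']}
--     >>> load_plugin_names(settings)
--     ['a', 'c', 'a.c']
--     """
--     seen = set()
--
--     def generate_name(path, maxsplit=0, splits=None):
--         if splits is None:
--             splits = len(path.split('.')) - 1
--         name = '.'.join(path.split('.', splits - maxsplit)[-1].rsplit('.',
--                         maxsplit))
--         if name not in seen or maxsplit >= splits: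
--             seen.add(name)
--             return name
--         return generate_name(path, maxsplit + 1, splits)
--
--     if settings['PLUGINS']:
--         return [generate_name(path) for path in settings['PLUGINS']]
--     else:
--         return ['Annotations']
-- ===== SOURCE B (Python) =====
-- def load_plugin_names(settings):
--     plugins = settings['PLUGINS']
--     if not plugins:
--         return ['Annotations']
--     seen = set()
--     out = []
--     for path in plugins:
--         parts = path.split('.')
--         for k in range(1, len(parts) + 1):
--             cand = '.'.join(parts[len(parts) - k:])
--             if k >= len(parts) or cand not in seen:
--                 seen.add(cand)
--                 out.append(cand)
--                 break
--     return out
-- ===== Notes on version B (the rewrite author's own statement) =====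
-- stated objective: simpler
-- what changed: Replaces A's tail-recursive helper that re-splits the path with split(maxsplit)+rsplit at every attempt by a single split per path and a direct loop over suffix lengths joining the last k components.
import Mathlib
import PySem

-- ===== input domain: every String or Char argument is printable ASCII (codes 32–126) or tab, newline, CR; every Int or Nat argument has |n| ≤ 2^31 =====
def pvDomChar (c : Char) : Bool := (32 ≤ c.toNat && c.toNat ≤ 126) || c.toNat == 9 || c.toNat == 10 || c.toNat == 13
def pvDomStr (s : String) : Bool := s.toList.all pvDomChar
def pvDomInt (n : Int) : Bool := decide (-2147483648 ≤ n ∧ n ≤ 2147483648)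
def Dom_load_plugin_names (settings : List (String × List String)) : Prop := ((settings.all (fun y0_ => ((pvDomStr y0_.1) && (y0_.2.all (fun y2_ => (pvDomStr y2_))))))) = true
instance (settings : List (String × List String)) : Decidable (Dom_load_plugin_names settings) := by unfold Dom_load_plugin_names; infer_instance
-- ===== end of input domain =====

-- B replaces A's tail-recursive maxsplit search (which re-splits the path with split(maxsplit) + rsplit
-- on every attempt) by one split per path and a direct loop over suffix lengths; same 'seen' discipline.

-- ===== PORT A =====
-- hand port of str.rsplit('.', k) for k ≥ 0 (PySem has no rsplit): a full split, then the pieces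
-- before the last k are re-joined into one head piece; exact for the single-char separator '.'.
def pyRsplitDot (s : String) (k : Nat) : List String :=
  let parts := (PySem.Str.split? s ".").getD []
  if parts.length ≤ k + 1 then parts
  else PySem.Str.join "." (parts.take (parts.length - k)) :: parts.drop (parts.length - k)

-- A's inner 'generate_name(path, maxsplit, splits)'; returns the name and the updated 'seen'.
def generate_name (seen : PySem.Set String) (path : String) (maxsplit : Nat) (splits : Nat) :
    String × PySem.Set String :=
  let name := PySem.Str.join "."
    (pyRsplitDot ((((PySem.Str.splitMax? path "." ((splits : Int) - (maxsplit : Int))).getD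
        []).getLastD "")) maxsplit)
  if name ∉ seen ∨ splits ≤ maxsplit then (name, seen.add name)
  else generate_name seen path (maxsplit + 1) splits
termination_by splits - maxsplit
decreasing_by omega

def load_plugin_names (settings : List (String × List String)) : List String :=
  match settings.find? (fun p => p.1 == "PLUGINS") with
  | none => []   -- Python raises KeyError here; excluded by Pre_
  | some (_, plugins) =>
    if plugins ≠ [] then
      (plugins.foldl (fun (st : List String × PySem.Set String) path =>
          -- 'splits is None' default: computed as len(path.split('.')) - 1
          let splits := ((PySem.Str.split? path ".").getD []).length - 1
          let r := generate_name st.2 path 0 splits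
          (st.1 ++ [r.1], r.2)) ([], PySem.Set.ofList [])).1
    else ["Annotations"]

-- ===== PORT B =====
-- B's inner loop 'for k in range(1, len(parts)+1): … break': first fresh suffix of length k.
def pickName (seen : PySem.Set String) (parts : List String) (k : Nat) : String :=
  let cand := PySem.Str.join "." (parts.drop (parts.length - k))
  if parts.length ≤ k ∨ cand ∉ seen then cand
  else pickName seen parts (k + 1)
termination_by parts.length - k
decreasing_by omega

def load_plugin_names_alt (settings : List (String × List String)) : List String :=
  match settings.find? (fun p => p.1 == "PLUGINS") with
  | none => []   -- Python raises KeyError here; excluded by Pre_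
  | some (_, plugins) =>
    if plugins = [] then ["Annotations"]
    else
      (plugins.foldl (fun (st : List String × PySem.Set String) path =>
          let parts := (PySem.Str.split? path ".").getD []
          let cand := pickName st.2 parts 1
          (st.1 ++ [cand], st.2.add cand)) ([], PySem.Set.ofList [])).1

-- ===== PRECONDITION & SPEC =====
-- Pre_ excludes only the inputs where A raises KeyError: no 'PLUGINS' key in settings.
def Pre_load_plugin_names (settings : List (String × List String)) : Prop :=
  "PLUGINS" ∈ settings.map Prod.fst
instance (settings : List (String × List String)) : Decidable (Pre_load_plugin_names settings) := by
  unfold Pre_load_plugin_names; infer_instance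

def pvWitness_load_plugin_names : (List (String × List String)) :=
  [("PLUGINS", ["a", "b.c", "a.c"])]

def Spec_load_plugin_names (settings : List (String × List String)) (out : List String) : Prop := out = load_plugin_names_alt settings
instance (settings : List (String × List String)) (out : List String) : Decidable (Spec_load_plugin_names settings out) := by unfold Spec_load_plugin_names; infer_instance

-- ===== CLAIM (what is proved, stated in full; the proofs are below) =====
def Claim_equal_load_plugin_names : Prop := ∀ (settings : List (String × List String)), Dom_load_plugin_names settings → Pre_load_plugin_names settings → Spec_load_plugin_names settings (load_plugin_names settings)

-- ===== LEMMAS AND PROOFS =====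

theorem splitOn_go_spec (c : Char) :
    ∀ (fuel : Nat) (l cur : List Char) (acc : List (List Char)), l.length < fuel →
      PySem.Chars.splitOn.go [c] fuel l cur acc
        = acc.reverse ++ (l.splitOn c).modifyHead (cur.reverse ++ ·) := by
  intro fuel
  induction fuel with
  | zero => intro l cur acc h; omega
  | succ fuel ih =>
    intro l cur acc h
    cases l with
    | nil => simp [PySem.Chars.splitOn.go, List.splitOn]
    | cons ch rest =>
      by_cases hc : ch = c
      · subst hc
        rw [show PySem.Chars.splitOn.go [ch] (fuel+1) (ch::rest) cur acc
              = PySem.Chars.splitOn.go [ch] fuel (List.drop 1 (ch::rest)) [] (cur.reverse :: acc) by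
            simp [PySem.Chars.splitOn.go, List.isPrefixOf]]
        rw [ih _ _ _ (by simpa using Nat.lt_of_succ_lt_succ h)]
        simp [List.splitOn, List.splitOnP_cons, show (fun x : List Char => x) = id from rfl]
      · rw [show PySem.Chars.splitOn.go [c] (fuel+1) (ch::rest) cur acc
              = PySem.Chars.splitOn.go [c] fuel rest (ch::cur) acc by
            simp [PySem.Chars.splitOn.go, List.isPrefixOf, Ne.symm hc]]
        rw [ih _ _ _ (by simpa using Nat.lt_of_succ_lt_succ h)]
        have hne := List.splitOnP_ne_nil (fun a => a == c) rest
        simp only [List.splitOn, List.splitOnP_cons, beq_iff_eq, hc, if_false]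
        cases hP : List.splitOnP (fun a => a == c) rest with
        | nil => exact absurd hP hne
        | cons p ps => simp

theorem chars_splitOn_eq (c : Char) (cs : List Char) :
    PySem.Chars.splitOn cs [c] = cs.splitOn c := by
  rw [PySem.Chars.splitOn, splitOn_go_spec c _ _ _ _ (Nat.lt_succ_self _)]
  cases (cs.splitOn c) <;> simp

def capJoin (c : Char) (m : Nat) (P : List (List Char)) : List (List Char) :=
  if P.length ≤ m + 1 then P else P.take m ++ [[c].intercalate (P.drop m)]

theorem splitOnMax_go_spec (c : Char) :
    ∀ (fuel : Nat) (m : Nat) (l cur : List Char) (acc : List (List Char)), l.length < fuel →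
      PySem.Chars.splitOnMax.go [c] fuel m l cur acc
        = acc.reverse ++ (capJoin c m (l.splitOn c)).modifyHead (cur.reverse ++ ·) := by
  intro fuel
  induction fuel with
  | zero => intro m l cur acc h; omega
  | succ fuel ih =>
    intro m l cur acc h
    cases l with
    | nil =>
      simp [PySem.Chars.splitOnMax.go, List.splitOn, capJoin]
    | cons ch rest =>
      rcases Nat.eq_zero_or_pos m with hm | hm
      · subst hm
        rw [show PySem.Chars.splitOnMax.go [c] (fuel+1) 0 (ch::rest) cur acc
              = ((cur.reverse ++ (ch::rest)) :: acc).reverse by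
            simp [PySem.Chars.splitOnMax.go]]
        have hI : [c].intercalate ((ch::rest).splitOn c) = ch :: rest :=
          List.intercalate_splitOn _ _
        have hne : (ch::rest).splitOn c ≠ [] := List.splitOnP_ne_nil _ _
        rw [capJoin]
        split
        · -- length ≤ 1: singleton
          rename_i hlen
          cases hP : (ch::rest).splitOn c with
          | nil => exact absurd hP hne
          | cons p ps =>
            cases ps with
            | nil =>
              have : p = ch :: rest := by rw [hP] at hI; simpa [List.intercalate] using hI
              simp [this]
            | cons q qs => rw [hP] at hlen; simp at hlen
        · cases hP : (ch::rest).splitOn c with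
          | nil => exact absurd hP hne
          | cons p ps => simp [hP ▸ hI]
      · obtain ⟨m', rfl⟩ : ∃ m', m = m' + 1 := ⟨m - 1, by omega⟩
        by_cases hc : ch = c
        · subst hc
          rw [show PySem.Chars.splitOnMax.go [ch] (fuel+1) (m'+1) (ch::rest) cur acc
                = PySem.Chars.splitOnMax.go [ch] fuel (m'+1-1) (List.drop 1 (ch::rest)) [] (cur.reverse :: acc) by
              simp [PySem.Chars.splitOnMax.go, List.isPrefixOf]]
          rw [ih _ _ _ _ (by simpa using Nat.lt_of_succ_lt_succ h)]
          have hsp : (ch::rest).splitOn ch = [] :: rest.splitOn ch := by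
            simp [List.splitOn, List.splitOnP_cons]
          rw [hsp, show capJoin ch (m'+1) ([] :: rest.splitOn ch) = [] :: capJoin ch m' (rest.splitOn ch) by
            simp only [capJoin, List.length_cons, List.take_succ_cons, List.drop_succ_cons]
            split <;> split <;> first | rfl | omega]
          have hid : (capJoin ch m' (List.splitOn ch rest)).modifyHead (fun x => x)
              = capJoin ch m' (List.splitOn ch rest) := by
            cases capJoin ch m' (List.splitOn ch rest) <;> simp
          simp [hid]
        · rw [show PySem.Chars.splitOnMax.go [c] (fuel+1) (m'+1) (ch::rest) cur acc
                = PySem.Chars.splitOnMax.go [c] fuel (m'+1) rest (ch::cur) acc by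
              simp [PySem.Chars.splitOnMax.go, List.isPrefixOf, Ne.symm hc]]
          rw [ih _ _ _ _ (by simpa using Nat.lt_of_succ_lt_succ h)]
          have hne := List.splitOnP_ne_nil (fun a => a == c) rest
          simp only [List.splitOn, List.splitOnP_cons, beq_iff_eq, hc, if_false]
          cases hP : List.splitOnP (fun a => a == c) rest with
          | nil => exact absurd hP hne
          | cons p ps =>
            -- capJoin commutes with modifyHead (cons ch) on a nonempty list
            simp only [List.modifyHead_cons, capJoin, List.length_cons]
            split
            · simp
            · rename_i hlen
              have hm2 : m' + 1 ≤ ps.length := by simp at hlen; omega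
              obtain ⟨q, qs, rfl⟩ : ∃ q qs, ps = q :: qs := by
                cases ps with
                | nil => simp at hm2
                | cons q qs => exact ⟨q, qs, rfl⟩
              simp [List.take_succ_cons, List.drop_succ_cons]

theorem chars_splitOnMax_eq (c : Char) (cs : List Char) (n : Nat) :
    PySem.Chars.splitOnMax cs [c] (n : Int) = capJoin c n (cs.splitOn c) := by
  rw [PySem.Chars.splitOnMax, if_neg (by omega)]
  rw [show ((n : Int)).toNat = n from rfl]
  rw [splitOnMax_go_spec c _ _ _ _ _ (Nat.lt_succ_self _)]
  cases capJoin c n (cs.splitOn c) <;> simp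

theorem not_mem_of_mem_splitOn (c : Char) (cs l : List Char) (h : l ∈ cs.splitOn c) : c ∉ l := by
  rw [List.splitOn] at h
  induction cs generalizing l with
  | nil =>
    rw [show List.splitOnP (fun a => a == c) ([] : List Char) = [[]] from rfl] at h
    simp at h; simp [h]
  | cons ch rest ih =>
    rw [List.splitOnP_cons] at h
    by_cases hc : ch = c
    · subst hc
      rw [if_pos (by simp)] at h
      rcases List.mem_cons.1 h with rfl | h
      · simp
      · exact ih _ h
    · rw [if_neg (by simp [hc])] at h
      cases hP : List.splitOnP (fun a => a == c) rest with
      | nil => exact absurd hP (List.splitOnP_ne_nil _ _)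
      | cons p ps =>
        rw [hP] at h
        rcases List.mem_cons.1 h with rfl | h
        · intro hmem
          rcases List.mem_cons.1 hmem with rfl | hmem
          · exact hc rfl
          · exact ih p (by rw [hP]; exact List.mem_cons_self ..) hmem
        · exact ih _ (by rw [hP]; exact List.mem_cons_of_mem _ h)

theorem str_split_dot (path : String) :
    PySem.Str.split? path "." = some ((path.toList.splitOn '.').map String.ofList) := by
  have h := PySem.Str.split?_map path "."
  rw [PySem.Chars.split?] at h
  rw [show ".".toList = ['.'] from rfl] at h
  rw [if_neg (by simp)] at h
  rw [chars_splitOn_eq] at h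
  cases hs : PySem.Str.split? path "." with
  | none => rw [hs] at h; simp at h
  | some parts =>
    rw [hs] at h
    simp only [Option.map_some, Option.some.injEq] at h
    congr 1
    rw [← h]
    simp [Function.comp_def]

theorem str_splitMax_dot (path : String) (n : Nat) :
    PySem.Str.splitMax? path "." (n : Int)
      = some ((capJoin '.' n (path.toList.splitOn '.')).map String.ofList) := by
  rw [PySem.Str.splitMax?]
  rw [show ".".toList = ['.'] from rfl]
  rw [PySem.Chars.splitMax?, if_neg (by simp), chars_splitOnMax_eq]
  rfl

theorem cand_eq (path : String) (m : Nat)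
    (hm : m ≤ ((PySem.Str.split? path ".").getD []).length - 1) :
    PySem.Str.join "."
      (pyRsplitDot ((((PySem.Str.splitMax? path "."
          ((((((PySem.Str.split? path ".").getD []).length - 1) : Nat) : Int) - (m : Int))).getD
          []).getLastD "")) m)
    = PySem.Str.join "." (((PySem.Str.split? path ".").getD []).drop
        (((PySem.Str.split? path ".").getD []).length - (m + 1))) := by
  have hsp := str_split_dot path
  set P := path.toList.splitOn '.' with hP
  have hPne : P ≠ [] := List.splitOnP_ne_nil _ _
  have hL1 : 1 ≤ P.length := List.length_pos_iff.2 hPne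
  rw [hsp] at hm ⊢
  simp only [Option.getD_some, List.length_map] at hm ⊢
  set L := P.length with hLdef
  set n := L - 1 - m with hn
  have hcast : ((L - 1 : Nat) : Int) - (m : Int) = ((n : Nat) : Int) := by omega
  rw [hcast, str_splitMax_dot]
  -- last element of the capped split
  have hdropne : P.drop n ≠ [] := by
    intro hnil
    rw [List.drop_eq_nil_iff] at hnil
    omega
  have hlast : ((capJoin '.' n P).map String.ofList).getLastD ""
      = String.ofList ([('.' : Char)].intercalate (P.drop n)) := by
    rw [capJoin]
    split
    · rename_i hle
      have hnL : n = L - 1 := by omega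
      obtain ⟨p, hp⟩ : ∃ p, P.drop n = [p] := by
        have : (P.drop n).length = 1 := by simp [List.length_drop]; omega
        cases hD : P.drop n with
        | nil => exact absurd hD hdropne
        | cons a as => rw [hD] at this; cases as with
          | nil => exact ⟨a, rfl⟩
          | cons b bs => simp at this
      rw [show [('.' : Char)].intercalate (P.drop n) = p by rw [hp]; simp [List.intercalate]]
      -- getLastD of the mapped list is ofList of P's last element, which is p
      have h1 : P.getLast? = some p := by
        conv_lhs => rw [← List.take_append_drop n P]
        rw [List.getLast?_append_of_ne_nil _ hdropne, hp]
        simp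
      rw [List.getLastD_eq_getLast?, List.getLast?_map, h1]
      simp
    · rw [List.map_append]
      simp
  rw [Option.getD_some, hlast]
  -- now the rsplit
  rw [pyRsplitDot]
  have hT : PySem.Str.split? (String.ofList ([('.' : Char)].intercalate (P.drop n))) "."
      = some ((P.drop n).map String.ofList) := by
    rw [str_split_dot, String.toList_ofList]
    rw [List.splitOn_intercalate _ _ (fun l hl => not_mem_of_mem_splitOn '.' path.toList l
      (List.mem_of_mem_drop hl)) hdropne]
  rw [hT, Option.getD_some]
  rw [if_pos (by simp [List.length_drop]; omega)]
  rw [← List.map_drop]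
  have hidx : L - (m + 1) = n := by omega
  rw [hidx]

theorem gen_eq_pick (path : String) (seen : PySem.Set String) (m : ℕ)
    (hm : m ≤ ((PySem.Str.split? path ".").getD []).length - 1) :
    generate_name seen path m (((PySem.Str.split? path ".").getD []).length - 1)
      = (pickName seen ((PySem.Str.split? path ".").getD []) (m + 1),
         seen.add (pickName seen ((PySem.Str.split? path ".").getD []) (m + 1))) := by
  have hPne : path.toList.splitOn '.' ≠ [] := by
    rw [List.splitOn]; exact List.splitOnP_ne_nil _ _
  have hlen : 1 ≤ ((PySem.Str.split? path ".").getD []).length := by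
    rw [str_split_dot path]
    simpa using List.length_pos_iff.2 hPne
  generalize ht : ((PySem.Str.split? path ".").getD []).length - 1 - m = t
  induction t generalizing m seen with
  | zero =>
    rw [generate_name, pickName]
    rw [cand_eq path m hm]
    rw [if_pos (Or.inr (by omega)), if_pos (Or.inl (by omega))]
  | succ t iht =>
    rw [generate_name, pickName]
    rw [cand_eq path m hm]
    by_cases hC : PySem.Str.join "." (((PySem.Str.split? path ".").getD []).drop
        (((PySem.Str.split? path ".").getD []).length - (m + 1))) ∉ seen
    · rw [if_pos (Or.inl hC), if_pos (Or.inr hC)]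
    · rw [if_neg (by push Not; push Not at hC; exact ⟨hC, by omega⟩),
        if_neg (by push Not; push Not at hC; exact ⟨by omega, hC⟩)]
      exact iht seen (m + 1) (by omega) (by omega)

-- ===== VERDICT (by name: the statement is the Claim_ definition above) =====
theorem load_plugin_names_spec : Claim_equal_load_plugin_names := by
  intro settings _ _
  unfold Spec_load_plugin_names load_plugin_names load_plugin_names_alt
  cases hf : settings.find? (fun p => p.1 == "PLUGINS") with
  | none => rfl
  | some kv =>
    obtain ⟨k, plugins⟩ := kv
    by_cases hp : plugins = []
    · subst hp; simp
    · simp only [if_pos hp, if_neg hp, ne_eq]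
      have hfun : (fun (st : List String × PySem.Set String) path =>
            let splits := ((PySem.Str.split? path ".").getD []).length - 1
            let r := generate_name st.2 path 0 splits
            (st.1 ++ [r.1], r.2))
          = (fun (st : List String × PySem.Set String) path =>
            let parts := (PySem.Str.split? path ".").getD []
            let cand := pickName st.2 parts 1
            (st.1 ++ [cand], st.2.add cand)) := by
        funext st path
        show (_, _) = (_, _)
        rw [gen_eq_pick path st.2 0 (Nat.zero_le _)]
      rw [hfun]
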